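-- pv_equiv track=rewrite | github.com/Anspar-Org/elspais | tests/test_cli_string_validity.py | _preceded_by_non_cli_token
-- ===== SOURCE A (Python) =====
-- _TERMINATORS = set("`\"'|\n#")
--
-- _NOT_A_CLI_PREFIXES = {
--     "runpip",
--     "pip",
--     "pipx",
--     "python",
--     "python3",
--     "which",
--     "the",
--     "a",
--     "an",
--     "your",
--     "our",
--     "my",
--     "this",
--     "that",
--     "into",
--     "from",
--     "of",
-- }
--
-- def _preceded_by_non_cli_token(s: str, pos: int) -> bool:
--     """Return True if the word immediately before `s[pos]` is something
--     like `runpip` or `pipx` — signalling this `elspais` is a package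
--     name, not a command.
--     """
--     # Look back past whitespace; grab the previous word.
--     i = pos - 1
--     while i >= 0 and s[i].isspace():
--         i -= 1
--     end = i + 1
--     while i >= 0 and not s[i].isspace() and s[i] not in _TERMINATORS:
--         i -= 1
--     prev = s[i + 1 : end]
--     return prev in _NOT_A_CLI_PREFIXES
-- ===== SOURCE B (Python) =====
-- _TERMINATORS = set("`\"'|\n#")
--
-- _NOT_A_CLI_PREFIXES = {
--     "runpip", "pip", "pipx", "python", "python3", "which", "the", "a",
--     "an", "your", "our", "my", "this", "that", "into", "from", "of",
-- }
--
-- def _preceded_by_non_cli_token(s: str, pos: int) -> bool: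
--     """Single forward scan over s[:pos] tracking the last word seen."""
--     if pos <= 0:
--         return False
--     tok = ""
--     gap = False  # whitespace seen since tok was completed
--     for ch in s[:pos]:
--         if ch.isspace():
--             gap = True
--         elif ch in _TERMINATORS:
--             tok, gap = "", False
--         elif gap:
--             tok, gap = ch, False
--         else:
--             tok += ch
--     return tok in _NOT_A_CLI_PREFIXES
-- ===== Notes on version B (the rewrite author's own statement) =====
-- stated objective: alternative
-- what changed: Replaces A's two backward index while-loops with a single forward fold over the prefix s[:pos] that maintains (last-token, gap-seen) state, plus an early False for pos <= 0.
import Mathlib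
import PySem

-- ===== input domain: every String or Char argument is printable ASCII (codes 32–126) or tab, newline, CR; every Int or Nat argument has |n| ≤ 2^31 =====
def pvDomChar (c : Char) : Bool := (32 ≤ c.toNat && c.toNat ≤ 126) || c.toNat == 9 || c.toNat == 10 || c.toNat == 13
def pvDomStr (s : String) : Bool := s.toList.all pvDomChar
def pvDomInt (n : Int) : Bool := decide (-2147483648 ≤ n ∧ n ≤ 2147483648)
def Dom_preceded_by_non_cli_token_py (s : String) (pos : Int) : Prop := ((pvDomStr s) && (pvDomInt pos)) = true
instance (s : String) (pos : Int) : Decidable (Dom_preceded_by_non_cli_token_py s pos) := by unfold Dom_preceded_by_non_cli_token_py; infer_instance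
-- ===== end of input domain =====

-- B replaces A's two backward index while-loops by a single forward fold over s[:pos]
-- carrying (token, gap) state; an alternative decomposition, same return value.

-- ===== PORT A =====
def pvTermA : List Char := ['`', '"', '\'', '|', '\n', '#']

def pvNotCliA : List (List Char) :=
  ["runpip".toList, "pip".toList, "pipx".toList, "python".toList, "python3".toList,
   "which".toList, "the".toList, "a".toList, "an".toList, "your".toList, "our".toList,
   "my".toList, "this".toList, "that".toList, "into".toList, "from".toList, "of".toList]

-- while i >= 0 and s[i].isspace(): i -= 1
def pvLoopA1 (cs : List Char) (i : Int) : Int :=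
  if h : 0 ≤ i ∧ PySem.Chars.isspace (cs.getD i.toNat ' ') = true then pvLoopA1 cs (i - 1) else i
termination_by (i + 1).toNat
decreasing_by omega

-- while i >= 0 and not s[i].isspace() and s[i] not in _TERMINATORS: i -= 1
def pvLoopA2 (cs : List Char) (i : Int) : Int :=
  if h : 0 ≤ i ∧ PySem.Chars.isspace (cs.getD i.toNat ' ') = false ∧ (cs.getD i.toNat ' ') ∉ pvTermA then
    pvLoopA2 cs (i - 1)
  else i
termination_by (i + 1).toNat
decreasing_by omega

def preceded_by_non_cli_token_py (s : String) (pos : Int) : Bool :=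
  let cs := s.toList
  let i1 := pvLoopA1 cs (pos - 1)
  let e := i1 + 1
  let i2 := pvLoopA2 cs i1
  let prev := PySem.List.slice cs (some (i2 + 1)) (some e)
  decide (prev ∈ pvNotCliA)

-- ===== PORT B =====
def pvTermB : List Char := ['`', '"', '\'', '|', '\n', '#']

def pvNotCliB : List (List Char) :=
  ["runpip".toList, "pip".toList, "pipx".toList, "python".toList, "python3".toList,
   "which".toList, "the".toList, "a".toList, "an".toList, "your".toList, "our".toList,
   "my".toList, "this".toList, "that".toList, "into".toList, "from".toList, "of".toList]

-- the loop body of Source B: state = (tok, gap)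
def pvFoldB (st : List Char × Bool) (c : Char) : List Char × Bool :=
  if PySem.Chars.isspace c = true then (st.1, true)
  else if c ∈ pvTermB then ([], false)
  else if st.2 then ([c], false)
  else (st.1 ++ [c], false)

def preceded_by_non_cli_token_py_alt (s : String) (pos : Int) : Bool :=
  if pos ≤ 0 then false
  else
    let st := (PySem.List.slice s.toList none (some pos)).foldl pvFoldB ([], false)
    decide (st.1 ∈ pvNotCliB)

-- ===== PRECONDITION & SPEC =====
-- Pre_ excludes exactly pos > len(s), where Python A raises IndexError (s[pos - 1] is out of range).
def Pre_preceded_by_non_cli_token_py (s : String) (pos : Int) : Prop := pos ≤ (s.length : Int)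
instance (s : String) (pos : Int) : Decidable (Pre_preceded_by_non_cli_token_py s pos) := by
  unfold Pre_preceded_by_non_cli_token_py; infer_instance

def pvWitness_preceded_by_non_cli_token_py : String × Int := ("pip x", 4)

def Spec_preceded_by_non_cli_token_py (s : String) (pos : Int) (out : Bool) : Prop := out = preceded_by_non_cli_token_py_alt s pos
instance (s : String) (pos : Int) (out : Bool) : Decidable (Spec_preceded_by_non_cli_token_py s pos out) := by unfold Spec_preceded_by_non_cli_token_py; infer_instance

-- ===== CLAIM (what is proved, stated in full; the proofs are below) =====
def Claim_equal_preceded_by_non_cli_token_py : Prop := ∀ (s : String) (pos : Int), Dom_preceded_by_non_cli_token_py s pos → Pre_preceded_by_non_cli_token_py s pos → Spec_preceded_by_non_cli_token_py s pos (preceded_by_non_cli_token_py s pos)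

-- ===== LEMMAS AND PROOFS =====

-- proof-only abbreviations: whitespace and word characters
def pvWs (c : Char) : Bool := PySem.Chars.isspace c
def pvGood (c : Char) : Bool := !pvWs c && !decide (c ∈ pvTermA)

theorem pv_dropWhile_eq_drop (q : Char → Bool) (l : List Char) :
    l.dropWhile q = l.drop (l.takeWhile q).length := by
  induction l with
  | nil => rfl
  | cons h t ih =>
    by_cases hq : q h = true
    · simp [List.dropWhile_cons, List.takeWhile_cons, hq, ih]
    · simp [List.dropWhile_cons, List.takeWhile_cons, hq]


theorem pv_takeWhile_eq_take (q : Char → Bool) (l : List Char) :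
    l.takeWhile q = l.take (l.takeWhile q).length := by
  induction l with
  | nil => rfl
  | cons h t ih =>
    by_cases hq : q h = true
    · simp [List.takeWhile_cons, hq]; exact ih
    · simp [List.takeWhile_cons, hq]


theorem pv_foldB_spec (p : List Char) :
    p.foldl pvFoldB ([], false)
      = (((p.reverse.dropWhile pvWs).takeWhile pvGood).reverse,
         ((p.reverse.head?.map pvWs).getD false)) := by
  induction p using List.reverseRecOn with
  | nil => rfl
  | append_singleton p c ih =>
    rw [List.foldl_append, ih]
    simp only [List.foldl_cons, List.foldl_nil, List.reverse_append, List.reverse_cons,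
      List.reverse_nil, List.nil_append, List.cons_append, List.singleton_append]

    unfold pvFoldB
    by_cases hws : PySem.Chars.isspace c = true
    · simp [hws, List.dropWhile_cons, pvWs]
    · by_cases hterm : c ∈ pvTermB
      · have hterm' : c ∈ pvTermA := hterm
        have hg : pvGood c = false := by simp [pvGood, hterm']
        simp [hws, hterm, List.dropWhile_cons, List.takeWhile_cons, pvWs, hg]
      · have hterm' : c ∉ pvTermA := fun hx => hterm hx
        have hg : pvGood c = true := by simp [pvGood, pvWs, hws, hterm']
        cases hr : p.reverse with
        | nil => simp [hws, hterm, List.takeWhile_cons, hg, pvWs]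
        | cons h t =>
          by_cases hh : PySem.Chars.isspace h = true
          · have hgh : pvGood h = false := by simp [pvGood, pvWs, hh]
            simp [hws, hterm, hh, List.dropWhile_cons, List.takeWhile_cons, hg, pvWs, hgh]
          · simp [hws, hterm, hh, List.dropWhile_cons, List.takeWhile_cons, hg, pvWs]

theorem pv_loopA1_spec (cs : List Char) (k : Nat) (hk : k ≤ cs.length) :
    pvLoopA1 cs ((k : Int) - 1)
      = (k : Int) - 1 - (((cs.take k).reverse.takeWhile pvWs).length : Int) := by
  induction k with
  | zero => rw [pvLoopA1]; simp
  | succ k ih =>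
    have hk' : k < cs.length := by omega
    have hget : cs.getD (((k : Int) + 1 - 1).toNat) ' ' = cs[k] := by
      have h1 : ((k : Int) + 1 - 1).toNat = k := by omega
      rw [h1, List.getD_eq_getElem _ _ hk']
    have htake : (cs.take (k + 1)).reverse = cs[k] :: (cs.take k).reverse := by
      rw [List.take_succ]
      simp [List.getElem?_eq_getElem hk']
    rw [pvLoopA1]
    push_cast
    rw [hget]
    by_cases hws : PySem.Chars.isspace cs[k] = true
    · rw [dif_pos ⟨by omega, hws⟩]
      have h2 : ((k : Int) + 1 - 1 - 1) = (k : Int) - 1 := by ring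
      have hpw : pvWs cs[k] = true := hws
      rw [h2, ih (by omega), htake, List.takeWhile_cons, hpw]
      simp only [if_true, List.length_cons]
      push_cast
      ring
    · rw [dif_neg (by rintro ⟨-, h⟩; exact hws h)]
      have hpw : pvWs cs[k] = false := by simp [pvWs, hws]
      rw [htake, List.takeWhile_cons, hpw]
      simp


theorem pv_loopA2_spec (cs : List Char) (k : Nat) (hk : k ≤ cs.length) :
    pvLoopA2 cs ((k : Int) - 1)
      = (k : Int) - 1 - (((cs.take k).reverse.takeWhile pvGood).length : Int) := by
  induction k with
  | zero => rw [pvLoopA2]; simp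
  | succ k ih =>
    have hk' : k < cs.length := by omega
    have hget : cs.getD (((k : Int) + 1 - 1).toNat) ' ' = cs[k] := by
      have h1 : ((k : Int) + 1 - 1).toNat = k := by omega
      rw [h1, List.getD_eq_getElem _ _ hk']
    have htake : (cs.take (k + 1)).reverse = cs[k] :: (cs.take k).reverse := by
      rw [List.take_succ]
      simp [List.getElem?_eq_getElem hk']
    rw [pvLoopA2]
    push_cast
    rw [hget]
    by_cases hg : pvGood cs[k] = true
    · have h2 := hg
      simp only [pvGood, pvWs, Bool.and_eq_true, Bool.not_eq_true', decide_eq_false_iff_not] at h2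
      rw [dif_pos ⟨by omega, h2.1, h2.2⟩]
      have h3 : ((k : Int) + 1 - 1 - 1) = (k : Int) - 1 := by ring
      rw [h3, ih (by omega), htake, List.takeWhile_cons, hg]
      simp only [if_true, List.length_cons]
      push_cast
      ring
    · rw [dif_neg (by
        rintro ⟨-, h1, h2⟩
        exact hg (by simp [pvGood, pvWs, h1, h2]))]
      have hg' : pvGood cs[k] = false := by simpa using hg
      rw [htake, List.takeWhile_cons, hg']
      simp

theorem pv_main (s : String) (pos : Int) (hpre : pos ≤ (s.length : Int)) :
    preceded_by_non_cli_token_py s pos = preceded_by_non_cli_token_py_alt s pos := by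
  have hslen : s.length = s.toList.length := rfl
  by_cases hpos : pos ≤ 0
  · simp only [preceded_by_non_cli_token_py, preceded_by_non_cli_token_py_alt, if_pos hpos]
    rw [pvLoopA1]
    rw [dif_neg (by rintro ⟨h, -⟩; omega)]
    rw [pvLoopA2]
    rw [dif_neg (by rintro ⟨h, -⟩; omega)]
    have hnil : PySem.List.slice s.toList (some (pos - 1 + 1)) (some (pos - 1 + 1)) = ([] : List Char) := by
      apply List.eq_nil_of_length_eq_zero
      rw [PySem.List.length_slice]
      omega
    rw [hnil]
    decide
  · simp only [preceded_by_non_cli_token_py, preceded_by_non_cli_token_py_alt, if_neg hpos]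
    set cs := s.toList with hcs
    have hnlen : pos.toNat ≤ cs.length := by omega
    set n := pos.toNat with hn
    have hposn : (n : Int) = pos := Int.toNat_of_nonneg (by omega)
    rw [← hposn]
    rw [show (n : Int) - 1 = (n : Int) - 1 from rfl]
    rw [pv_loopA1_spec cs n hnlen]
    set p := cs.take n with hp
    have hplen : p.length = n := by simp [hp]; omega
    set L1 := (p.reverse.takeWhile pvWs).length with hL1
    have hL1le : L1 ≤ n := by
      calc L1 ≤ p.reverse.length := (List.takeWhile_sublist _).length_le
        _ = n := by simp [hplen]
    have e1 : (n : Int) - 1 - (L1 : Int) = ((n - L1 : ℕ) : Int) - 1 := by omega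
    rw [e1, pv_loopA2_spec cs (n - L1) (by omega)]
    -- K1
    have hq : (cs.take (n - L1)).reverse = p.reverse.dropWhile pvWs := by
      have h1 : cs.take (n - L1) = p.take (n - L1) := by
        rw [hp, List.take_take]
        congr 1
        omega
      rw [h1, List.reverse_take, hplen, show n - (n - L1) = L1 by omega,
        hL1, ← pv_dropWhile_eq_drop]
    set q := p.reverse.dropWhile pvWs with hqdef
    have hqlen : q.length = n - L1 := by
      rw [← hq]
      simp
      omega
    rw [hq]
    set L2 := (q.takeWhile pvGood).length with hL2
    have hL2le : L2 ≤ n - L1 := by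
      calc L2 ≤ q.length := (List.takeWhile_sublist _).length_le
        _ = n - L1 := hqlen
    have ea : ((n - L1 : ℕ) : Int) - 1 - (L2 : Int) + 1 = ((n - L1 - L2 : ℕ) : Int) := by omega
    have eb : ((n - L1 : ℕ) : Int) - 1 + 1 = ((n - L1 : ℕ) : Int) := by ring
    rw [ea, eb, PySem.List.slice_natCast]
    -- K2
    have hK2 : (cs.drop (n - L1 - L2)).take ((n - L1) - (n - L1 - L2)) = (q.takeWhile pvGood).reverse := by
      have hword : q.takeWhile pvGood = q.take L2 := by rw [hL2, ← pv_takeWhile_eq_take]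
      have hqrev : q.reverse = cs.take (n - L1) := by rw [← hq, List.reverse_reverse]
      rw [hword, List.reverse_take, hqlen, hqrev, List.drop_take]
    rw [hK2]
    -- B side
    rw [PySem.List.slice_to_natCast, ← hp, pv_foldB_spec p, ← hqdef]
    have hset : pvNotCliB = pvNotCliA := rfl
    rw [hset]


-- ===== VERDICT (by name: the statement is the Claim_ definition above) =====
theorem preceded_by_non_cli_token_py_spec : Claim_equal_preceded_by_non_cli_token_py := by
  intro s pos _ hpre
  unfold Spec_preceded_by_non_cli_token_py
  exact pv_main s pos hpre
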